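-- pv_equiv track=rewrite | github.com/BoyanZhou/LongStrain | longstrain/longitudinal_microbiome_20210721.py | _parse_piled_bases
-- ===== SOURCE A (Python) =====
-- def _parse_piled_bases(piled_bases):
--     # build a dict to record base types
--     base_type = {".": 0, "A": 0, "G": 0, "C": 0, "T": 0}
--     for base in piled_bases:
--         if base == "." or base == ",":
--             base_type["."] += 1
--         # if base is an alpha
--         else:
--             base = base.upper()     # turn all bases into upper
--             if base in ["A", "G", "C", "T"]:
--                 base_type[base] += 1
--             elif len(base) > 2 and base[2:].isalnum():
--                 # update the indel number in base_type dict
--                 base_indel = base[1:]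
--                 base_type[base_indel] = base_type.setdefault(base_indel, 0) + 1
--
--     ref_num = base_type["."]
--     # sort the base_type result
--     base_type = sorted(base_type.items(), key=lambda x: x[1], reverse=True)
--     if base_type[0][0] == ".":
--         alt1, alt1_num = base_type[1]
--         alt2, alt2_num = base_type[2]
--     else:
--         alt1, alt1_num = base_type[0]
--         if base_type[1][0] == ".":
--             alt2, alt2_num = base_type[2]
--         else:
--             alt2, alt2_num = base_type[1]
--     if alt1_num == 0:
--         alt1 = ""
--     if alt2_num == 0:
--         alt2 = ""
--     # return base type and its number
--     return ref_num, alt1, alt1_num, alt2, alt2_num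
-- ===== SOURCE B (Python) =====
-- def _parse_piled_bases(piled_bases):
--     # identical counting pass building the same insertion-ordered dict
--     base_type = {".": 0, "A": 0, "G": 0, "C": 0, "T": 0}
--     for base in piled_bases:
--         if base == "." or base == ",":
--             base_type["."] += 1
--         else:
--             base = base.upper()
--             if base in ["A", "G", "C", "T"]:
--                 base_type[base] += 1
--             elif len(base) > 2 and base[2:].isalnum():
--                 base_indel = base[1:]
--                 base_type[base_indel] = base_type.setdefault(base_indel, 0) + 1
--
--     ref_num = base_type["."]
--     # single linear pass instead of sorting: keep the two largest non-"." counts;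
--     # strict '>' keeps the earliest-inserted key ahead on ties, like the stable sort
--     alt1, alt1_num = "", -1
--     alt2, alt2_num = "", -1
--     for key, cnt in base_type.items():
--         if key == ".":
--             continue
--         if cnt > alt1_num:
--             alt1, alt1_num, alt2, alt2_num = key, cnt, alt1, alt1_num
--         elif cnt > alt2_num:
--             alt2, alt2_num = key, cnt
--     if alt1_num == 0:
--         alt1 = ""
--     if alt2_num == 0:
--         alt2 = ""
--     return ref_num, alt1, alt1_num, alt2, alt2_num
-- ===== Notes on version B (the rewrite author's own statement) =====
-- stated objective: alternative
-- what changed: The same counting dict is built, but the sorted()-then-positional-indexing selection of the reference count's two top alternates is replaced by a single linear top-2 scan over the dict items that skips the '.' key and uses strict '>' to reproduce the stable descending sort's tie order.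
import Mathlib
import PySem

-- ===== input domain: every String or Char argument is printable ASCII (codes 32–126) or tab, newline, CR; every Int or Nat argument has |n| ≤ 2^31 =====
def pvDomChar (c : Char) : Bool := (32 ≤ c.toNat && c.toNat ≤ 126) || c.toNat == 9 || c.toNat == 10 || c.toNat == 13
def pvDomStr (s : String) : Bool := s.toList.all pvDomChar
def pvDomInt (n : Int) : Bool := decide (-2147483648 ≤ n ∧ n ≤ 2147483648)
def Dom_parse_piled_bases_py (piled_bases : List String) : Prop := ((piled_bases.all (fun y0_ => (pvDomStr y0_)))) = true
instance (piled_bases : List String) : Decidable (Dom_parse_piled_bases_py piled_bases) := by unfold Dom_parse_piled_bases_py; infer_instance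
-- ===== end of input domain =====

-- B replaces A's sort-then-index selection of the two top alternate bases by a single
-- linear top-2 scan over the dict items (objective: alternative; same counting loop).

-- ===== PORT A =====
-- the counting loop is textually identical in A and in B; it is ported once and used by both ports
def pvBaseStep (d : PySem.Dict String Int) (base : String) : PySem.Dict String Int :=
  if base == "." || base == "," then d.modify "." 0 (· + 1)    -- base_type["."] += 1 (key always present)
  else
    let b := PySem.Str.upper base
    if b ∈ (["A", "G", "C", "T"] : List String) then d.modify b 0 (· + 1)
    else if 2 < PySem.Str.len b && PySem.Str.strIsalnum (PySem.Str.slice b (some 2) none) then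
      let bi := PySem.Str.slice b (some 1) none
      let d' := d.setdefault bi 0
      d'.insert bi (d'.getD bi 0 + 1)
    else d

def pvInitBase : PySem.Dict String Int :=
  PySem.Dict.ofList [(".", 0), ("A", 0), ("G", 0), ("C", 0), ("T", 0)]

def pvCountBases (piled_bases : List String) : PySem.Dict String Int :=
  piled_bases.foldl pvBaseStep pvInitBase

def parse_piled_bases_py (piled_bases : List String) : Int × String × Int × String × Int :=
  let d := pvCountBases piled_bases
  let ref_num := d.getD "." 0                                  -- base_type["."] (key always present)
  let s := PySem.List.sorted d.items (fun p => p.2) true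
  match s with
  | x0 :: x1 :: x2 :: _ =>
    let sel : (String × Int) × (String × Int) :=
      if x0.1 == "." then (x1, x2)
      else if x1.1 == "." then (x0, x2)
      else (x0, x1)
    (ref_num, if sel.1.2 == 0 then "" else sel.1.1, sel.1.2,
              if sel.2.2 == 0 then "" else sel.2.1, sel.2.2)
  | _ => (ref_num, "", 0, "", 0)                               -- unreachable: the dict always holds ≥ 5 keys

-- ===== PORT B =====
def pvScanStep (st : (String × Int) × (String × Int)) (p : String × Int) :
    (String × Int) × (String × Int) :=
  if p.1 == "." then st
  else if p.2 > st.1.2 then (p, st.1)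
  else if p.2 > st.2.2 then (st.1, p)
  else st

def parse_piled_bases_py_alt (piled_bases : List String) : Int × String × Int × String × Int :=
  let d := pvCountBases piled_bases
  let ref_num := d.getD "." 0
  let st := d.items.foldl pvScanStep (("", -1), ("", -1))
  (ref_num, if st.1.2 == 0 then "" else st.1.1, st.1.2,
            if st.2.2 == 0 then "" else st.2.1, st.2.2)

-- ===== PRECONDITION & SPEC =====
def Spec_parse_piled_bases_py (piled_bases : List String) (out : Int × String × Int × String × Int) : Prop := out = parse_piled_bases_py_alt piled_bases
instance (piled_bases : List String) (out : Int × String × Int × String × Int) : Decidable (Spec_parse_piled_bases_py piled_bases out) := by unfold Spec_parse_piled_bases_py; infer_instance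

-- ===== CLAIM (what is proved, stated in full; the proofs are below) =====
def Claim_equal_parse_piled_bases_py : Prop := ∀ (piled_bases : List String), Dom_parse_piled_bases_py piled_bases → Spec_parse_piled_bases_py piled_bases (parse_piled_bases_py piled_bases)

-- ===== LEMMAS AND PROOFS =====

-- proof-side abbreviations
def pvBf (a b : String × Int) : Bool := decide (b.2 < a.2)

def pvQ (p : String × Int) : Bool := !(p.1 == ".")

-- the non-skipping part of B's scan step
def pvScan2 (st : (String × Int) × (String × Int)) (p : String × Int) :
    (String × Int) × (String × Int) :=
  if p.2 > st.1.2 then (p, st.1)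
  else if p.2 > st.2.2 then (st.1, p)
  else st

-- the first two entries of a list, sentinel-padded like B's initial state
def pvTop (acc : List (String × Int)) : (String × Int) × (String × Int) :=
  (acc[0]?.getD ("", -1), acc[1]?.getD ("", -1))

-- B's skipping fold is the plain fold over the non-"." items
theorem pvFoldl_skip (l : List (String × Int)) (st : (String × Int) × (String × Int)) :
    l.foldl pvScanStep st = (l.filter pvQ).foldl pvScan2 st := by
  induction l generalizing st with
  | nil => rfl
  | cons x xs ih =>
    by_cases h : x.1 = "."
    · simp [pvScanStep, pvQ, h, ih]
    · simp [pvScanStep, pvScan2, pvQ, h, ih]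

-- insertBy into a list all of whose elements come strictly after x
theorem pvInsertBy_head (x : String × Int) (l : List (String × Int))
    (h : ∀ y ∈ l, pvBf x y = true) :
    PySem.List.insertBy pvBf x l = x :: l := by
  cases l with
  | nil => rfl
  | cons c cs => simp [PySem.List.insertBy, h c (by simp)]

-- one insertion updates the sentinel-padded top two exactly like B's scan step
theorem pvTop_insertBy (x : String × Int) (acc : List (String × Int)) (hx : 0 ≤ x.2) :
    pvTop (PySem.List.insertBy pvBf x acc) = pvScan2 (pvTop acc) x := by
  match acc with
  | [] =>
    simp [PySem.List.insertBy, pvTop, pvScan2]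
    omega
  | [a] =>
    by_cases h : a.2 < x.2
    · simp [PySem.List.insertBy, pvBf, pvTop, pvScan2, h]
    · simp [PySem.List.insertBy, pvBf, pvTop, pvScan2, h]
      omega
  | a :: b :: rest =>
    by_cases h1 : a.2 < x.2
    · simp [PySem.List.insertBy, pvBf, pvTop, pvScan2, h1]
    · by_cases h2 : b.2 < x.2
      · simp [PySem.List.insertBy, pvBf, pvTop, pvScan2, h1, h2]
      · simp [PySem.List.insertBy, pvBf, pvTop, pvScan2, h1, h2]

-- filtering commutes with one insertion into a descending list (kept element)
theorem pvFilter_insertBy (x : String × Int) (acc : List (String × Int))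
    (hs : acc.Pairwise (fun a b => b.2 ≤ a.2)) (hx : pvQ x = true) :
    (PySem.List.insertBy pvBf x acc).filter pvQ =
      PySem.List.insertBy pvBf x (acc.filter pvQ) := by
  induction acc with
  | nil => simp [PySem.List.insertBy, hx]
  | cons a rest ih =>
    rcases List.pairwise_cons.mp hs with ⟨ha, hrest⟩
    by_cases h1 : a.2 < x.2
    · have hb : pvBf x a = true := by simp [pvBf]; omega
      rw [show PySem.List.insertBy pvBf x (a :: rest) = x :: a :: rest by
        simp [PySem.List.insertBy, hb]]
      rw [pvInsertBy_head x ((a :: rest).filter pvQ)]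
      · simp [hx]
      · intro y hy
        have hy' := List.mem_of_mem_filter hy
        simp [pvBf]
        rcases List.mem_cons.mp hy' with h | h
        · rw [h]; omega
        · have := ha y h; omega
    · have hb : pvBf x a = false := by simp [pvBf]; omega
      rw [show PySem.List.insertBy pvBf x (a :: rest) =
            a :: PySem.List.insertBy pvBf x rest by simp [PySem.List.insertBy, hb]]
      by_cases hqa : pvQ a
      · rw [show ((a :: rest).filter pvQ) = a :: rest.filter pvQ by simp [hqa]]
        rw [show PySem.List.insertBy pvBf x (a :: rest.filter pvQ) =
              a :: PySem.List.insertBy pvBf x (rest.filter pvQ) by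
            simp [PySem.List.insertBy, hb]]
        simp [hqa, ih hrest]
      · simp only [List.filter_cons]
        simp only [hqa]
        simp only [Bool.false_eq_true, if_false]
        exact ih hrest

-- filtering commutes with one insertion (dropped element)
theorem pvFilter_insertBy_drop (x : String × Int) (acc : List (String × Int))
    (hx : pvQ x = false) :
    (PySem.List.insertBy pvBf x acc).filter pvQ = acc.filter pvQ := by
  induction acc with
  | nil => simp [PySem.List.insertBy, hx]
  | cons a rest ih =>
    by_cases hb : pvBf x a
    · simp [PySem.List.insertBy, hb, hx]
    · simp [PySem.List.insertBy, hb, List.filter_cons, ih]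

-- the stable descending sort of the input and insertBy, one element at a time
theorem pvSorted_snoc (l : List (String × Int)) (x : String × Int) :
    PySem.List.sorted (l ++ [x]) (fun p => p.2) true =
      PySem.List.insertBy pvBf x (PySem.List.sorted l (fun p => p.2) true) := by
  rw [PySem.List.sorted_rev_eq_foldl_insertBy, PySem.List.sorted_rev_eq_foldl_insertBy,
    List.foldl_append]
  rfl

-- stable sort commutes with filtering out the "." entry
theorem pvFilter_sorted (l : List (String × Int)) :
    (PySem.List.sorted l (fun p => p.2) true).filter pvQ =
      PySem.List.sorted (l.filter pvQ) (fun p => p.2) true := by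
  induction l using List.reverseRecOn with
  | nil => rfl
  | append_singleton l x ih =>
    rw [pvSorted_snoc, List.filter_append]
    by_cases hx : pvQ x
    · rw [pvFilter_insertBy x _ (PySem.List.sorted_pairwise_rev l (fun p => p.2)) hx,
        ih, show ([x].filter pvQ) = [x] by simp [hx], pvSorted_snoc]
    · rw [pvFilter_insertBy_drop x _ (by simpa using hx), ih]
      simp [hx]

-- B's scan computes the sentinel-padded top two of the stable descending sort
theorem pvScan_eq_top_sorted (t : List (String × Int)) (h : ∀ y ∈ t, 0 ≤ y.2) :
    t.foldl pvScan2 (("", -1), ("", -1)) =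
      pvTop (PySem.List.sorted t (fun p => p.2) true) := by
  induction t using List.reverseRecOn with
  | nil => rfl
  | append_singleton l x ih =>
    rw [List.foldl_append, pvSorted_snoc, pvTop_insertBy x _ (h x (by simp)),
      ih (fun y hy => h y (by simp [hy]))]
    rfl

-- A's branching selection is the top two of the "."-filtered list
theorem pvSel_eq_top (x0 x1 x2 : String × Int) (rest : List (String × Int))
    (hnd : ((x0 :: x1 :: x2 :: rest).map Prod.fst).Nodup) :
    (if x0.1 == "." then (x1, x2)
     else if x1.1 == "." then (x0, x2)
     else (x0, x1)) = pvTop ((x0 :: x1 :: x2 :: rest).filter pvQ) := by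
  rw [List.map_cons, List.map_cons, List.map_cons] at hnd
  obtain ⟨h0n, hnd1⟩ := List.nodup_cons.mp hnd
  obtain ⟨h1n, _⟩ := List.nodup_cons.mp hnd1
  have h01 : x0.1 ≠ x1.1 := fun h => h0n (by simp [h])
  have h02 : x0.1 ≠ x2.1 := fun h => h0n (by simp [h])
  have h12 : x1.1 ≠ x2.1 := fun h => h1n (by simp [h])
  by_cases h0 : x0.1 = "."
  · have h1 : x1.1 ≠ "." := fun h => h01 (h0.trans h.symm)
    have h2 : x2.1 ≠ "." := fun h => h02 (h0.trans h.symm)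
    simp [pvQ, pvTop, h0, h1, h2]
  · by_cases h1 : x1.1 = "."
    · have h2 : x2.1 ≠ "." := fun h => h12 (h1.trans h.symm)
      simp [pvQ, pvTop, h0, h1, h2]
    · simp [pvQ, pvTop, h0, h1]

-- dict invariants along the counting loop
theorem pvSetdefault_getD (d : PySem.Dict String Int) (bi k : String) :
    (d.setdefault bi 0).getD k 0 = d.getD k 0 := by
  by_cases h : k = bi
  · subst h; exact PySem.Dict.getD_setdefault_self d k 0 0
  · rw [PySem.Dict.getD_eq_get?_getD, PySem.Dict.get?_setdefault_of_ne d 0 h,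
      ← PySem.Dict.getD_eq_get?_getD]

theorem pvStep_nodup (d : PySem.Dict String Int) (b : String) (h : d.keys.Nodup) :
    (pvBaseStep d b).keys.Nodup := by
  simp only [pvBaseStep]
  split_ifs with h1 h2 h3
  · rw [PySem.Dict.keys_modify]; exact PySem.Dict.nodup_keys_insert _ _ _ h
  · rw [PySem.Dict.keys_modify]; exact PySem.Dict.nodup_keys_insert _ _ _ h
  · apply PySem.Dict.nodup_keys_insert
    rw [PySem.Dict.keys_setdefault]
    split_ifs with hc
    · exact h
    · have hnm : PySem.Str.slice (PySem.Str.upper b) (some 1) none ∉ d.keys := by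
        rw [PySem.Dict.contains_eq_decide_mem_keys] at hc
        simpa using hc
      rw [List.nodup_append]
      exact ⟨h, List.nodup_singleton _, fun a ha c hc => by
        simp only [List.mem_singleton] at hc
        subst hc; exact fun e => hnm (e ▸ ha)⟩
  · exact h

theorem pvStep_getD (d : PySem.Dict String Int) (b : String)
    (h : ∀ k, 0 ≤ d.getD k 0) (k : String) : 0 ≤ (pvBaseStep d b).getD k 0 := by
  simp only [pvBaseStep]
  split_ifs with h1 h2 h3
  · rw [PySem.Dict.getD_modify]
    split_ifs
    · have := h "."; omega
    · exact h k
  · rw [PySem.Dict.getD_modify]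
    split_ifs
    · have := h (PySem.Str.upper b); omega
    · exact h k
  · rw [PySem.Dict.getD_insert]
    split_ifs with hk
    · rw [pvSetdefault_getD]
      have := h (PySem.Str.slice (PySem.Str.upper b) (some 1) none); omega
    · rw [pvSetdefault_getD]; exact h k
  · exact h k

theorem pvStep_contains (d : PySem.Dict String Int) (b c : String)
    (h : d.contains c = true) : (pvBaseStep d b).contains c = true := by
  simp only [pvBaseStep]
  split_ifs
  · simp [PySem.Dict.contains_modify, h]
  · simp [PySem.Dict.contains_modify, h]
  · simp [PySem.Dict.contains_insert, PySem.Dict.contains_setdefault, h]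
  · exact h

theorem pvCount_nodup_keys (bs : List String) : (pvCountBases bs).keys.Nodup := by
  unfold pvCountBases
  induction bs using List.reverseRecOn with
  | nil => decide
  | append_singleton l x ih => rw [List.foldl_append]; exact pvStep_nodup _ x ih

theorem pvCount_getD_nonneg (bs : List String) (k : String) :
    0 ≤ (pvCountBases bs).getD k 0 := by
  unfold pvCountBases
  induction bs using List.reverseRecOn generalizing k with
  | nil =>
    simp only [List.foldl_nil]
    rw [show pvInitBase =
      ((((PySem.Dict.empty.insert "." 0).insert "A" 0).insert "G" 0).insert "C" 0).insert "T" 0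
      from rfl]
    simp only [PySem.Dict.getD_insert, PySem.Dict.getD_empty]
    split_ifs <;> omega
  | append_singleton l x ih =>
    rw [List.foldl_append]
    exact pvStep_getD _ x (fun k' => ih k') k

theorem pvCount_contains (bs : List String) (c : String)
    (hc : c ∈ (["." , "A", "G", "C", "T"] : List String)) :
    (pvCountBases bs).contains c = true := by
  unfold pvCountBases
  induction bs using List.reverseRecOn with
  | nil => fin_cases hc <;> decide
  | append_singleton l x ih => rw [List.foldl_append]; exact pvStep_contains _ x c ih

theorem pvCount_len (bs : List String) : 5 ≤ (pvCountBases bs).items.length := by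
  have hsub : (["." , "A", "G", "C", "T"] : List String) ⊆ (pvCountBases bs).keys := by
    intro c hc
    have := pvCount_contains bs c hc
    rw [PySem.Dict.contains_eq_decide_mem_keys] at this
    simpa using this
  have h5 : 5 ≤ (pvCountBases bs).keys.length :=
    (List.subperm_of_subset (by decide) hsub).length_le
  simpa [PySem.Dict.keys] using h5

-- ===== VERDICT (by name: the statement is the Claim_ definition above) =====
theorem parse_piled_bases_py_spec : Claim_equal_parse_piled_bases_py := by
  intro bs _
  unfold Spec_parse_piled_bases_py parse_piled_bases_py parse_piled_bases_py_alt
  dsimp only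
  have hn := pvCount_nodup_keys bs
  have hpos : ∀ p ∈ (pvCountBases bs).items, 0 ≤ p.2 := by
    intro p hp
    have hmem : (p.1, p.2) ∈ (pvCountBases bs).items := by simpa using hp
    have := PySem.Dict.getD_of_mem_items (pvCountBases bs) hmem hn 0
    rw [← this]
    exact pvCount_getD_nonneg bs p.1
  -- B's scan equals the top two of the sorted, "."-filtered items
  have hB : (pvCountBases bs).items.foldl pvScanStep (("", -1), ("", -1)) =
      pvTop ((PySem.List.sorted (pvCountBases bs).items (fun p => p.2) true).filter pvQ) := by
    rw [pvFoldl_skip, pvScan_eq_top_sorted _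
        (fun y hy => hpos y (List.mem_of_mem_filter hy)), pvFilter_sorted]
  rcases hs : PySem.List.sorted (pvCountBases bs).items (fun p => p.2) true with
    _ | ⟨x0, _ | ⟨x1, _ | ⟨x2, rest⟩⟩⟩
  all_goals
    try (have := pvCount_len bs
         have hl := PySem.List.length_sorted (pvCountBases bs).items (fun p => p.2) true
         rw [hs] at hl; simp at hl; omega)
  -- the nodup keys of the sorted list
  have hndm : ((x0 :: x1 :: x2 :: rest).map Prod.fst).Nodup := by
    have hperm : (x0 :: x1 :: x2 :: rest).Perm (pvCountBases bs).items := by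
      rw [← hs]; exact PySem.List.sorted_perm _ _ _
    have : ((x0 :: x1 :: x2 :: rest).map Prod.fst).Perm (pvCountBases bs).keys :=
      hperm.map Prod.fst
    exact this.nodup_iff.mpr hn
  rw [hs] at hB
  rw [hB, ← pvSel_eq_top x0 x1 x2 rest hndm]
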